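-- pv_equiv track=rewrite | github.com/factcheckafrica/myaifactchecker | app/sample.py | _format_sources_links
-- ===== SOURCE A (Python) =====
-- def _split_title_url(s: str):
--     """Input item is 'Title - URL' or just 'URL'."""
--     if " - " in s:
--         title, url = s.split(" - ", 1)
--     else:
--         title, url = "Source", s
--     return title.strip(), url.strip()
--
-- def _score_source_credibility(url: str) -> int:
--     """
--     Score source credibility (1-5) based on domain.
--     5 = highly credible, 1 = use with caution
--     """
--     url_lower = url.lower()
--
--     # Tier 1: Official/Primary sources (5)
--     tier1_domains = [
--         '.gov.ng', 'inec.gov.ng', 'cbn.gov.ng', 'nigeriaembassyusa.org',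
--         'statehouse.gov.ng', 'ng.undp.org', 'nigeria.gov.ng'
--     ]
--     if any(d in url_lower for d in tier1_domains):
--         return 5
--
--     # Tier 2: Established international outlets (4)
--     tier2_domains = [
--         'bbc.com', 'bbc.co.uk', 'reuters.com', 'apnews.com', 'aljazeera.com',
--         'theguardian.com', 'cnn.com', 'bloomberg.com', 'nytimes.com'
--     ]
--     if any(d in url_lower for d in tier2_domains):
--         return 4
--
--     # Tier 3: Established Nigerian outlets (4)
--     tier3_domains = [
--         'channelstv.com', 'premiumtimesng.com', 'thecable.ng',
--         'punchng.com', 'vanguardngr.com', 'thenationonlineng.net',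
--         'dailytrust.com', 'saharareporters.com', 'businessday.ng',
--         'thisdaylive.com', 'tribuneonlineng.com'
--     ]
--     if any(d in url_lower for d in tier3_domains):
--         return 4
--
--     # Tier 4: General news sites (3)
--     if any(ext in url_lower for ext in ['.com', '.org', '.ng', '.net']):
--         return 3
--
--     # Tier 5: Social media, blogs, unknown (2)
--     low_cred = ['facebook.com', 'twitter.com', 'x.com', 'instagram.com',
--                 'tiktok.com', 'blog', 'wordpress.com', 'medium.com']
--     if any(d in url_lower for d in low_cred):
--         return 2
--
--     return 2  # Default: use with caution
--
-- def _format_sources_links(sources: list, max_n: int = 3) -> str: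
--     """Return a compact Sources block with clickable links, prioritized by credibility"""
--     if not sources:
--         return ""
--
--     # Score and sort sources by credibility
--     scored_sources = []
--     for s in sources:
--         title, url = _split_title_url(s)
--         score = _score_source_credibility(url)
--         scored_sources.append((score, s, title, url))
--
--     # Sort by credibility score (descending), then take top N
--     scored_sources.sort(key=lambda x: x[0], reverse=True)
--
--     items = []
--     for score, _, title, url in scored_sources[:max_n]:
--         items.append(f"- {title} — {url}")
--
--     return "Sources:\n" + "\n".join(items) if items else ""
-- ===== SOURCE B (Python) =====
-- def _split_title_url(s: str):
--     """Input item is 'Title - URL' or just 'URL'."""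
--     if " - " in s:
--         title, url = s.split(" - ", 1)
--     else:
--         title, url = "Source", s
--     return title.strip(), url.strip()
--
--
-- # One ordered table replaces the chain of tier checks (tiers 2 and 3 both
-- # score 4, and the low-credibility branch equals the default 2, so the
-- # table only needs three rows).
-- _TIER_TABLE = [
--     (5, ['.gov.ng', 'inec.gov.ng', 'cbn.gov.ng', 'nigeriaembassyusa.org',
--          'statehouse.gov.ng', 'ng.undp.org', 'nigeria.gov.ng']),
--     (4, ['bbc.com', 'bbc.co.uk', 'reuters.com', 'apnews.com', 'aljazeera.com',
--          'theguardian.com', 'cnn.com', 'bloomberg.com', 'nytimes.com',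
--          'channelstv.com', 'premiumtimesng.com', 'thecable.ng',
--          'punchng.com', 'vanguardngr.com', 'thenationonlineng.net',
--          'dailytrust.com', 'saharareporters.com', 'businessday.ng',
--          'thisdaylive.com', 'tribuneonlineng.com']),
--     (3, ['.com', '.org', '.ng', '.net']),
-- ]
--
--
-- def _cred_score(url: str) -> int:
--     u = url.lower()
--     for score, needles in _TIER_TABLE:
--         if any(n in u for n in needles):
--             return score
--     return 2
--
--
-- def _format_sources_links(sources: list, max_n: int = 3) -> str:
--     """Bucket the sources by credibility score instead of sorting them."""
--     if not sources:
--         return ""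
--
--     scored = []
--     for s in sources:
--         title, url = _split_title_url(s)
--         scored.append((_cred_score(url), title, url))
--
--     # Scores run 5..1; emitting the buckets high-to-low, each in input
--     # order, reproduces a stable descending sort.
--     ordered = [(t, u) for want in (5, 4, 3, 2, 1)
--                for k, t, u in scored if k == want]
--
--     items = ["- %s — %s" % (t, u) for t, u in ordered[:max_n]]
--     return "Sources:\n" + "\n".join(items) if items else ""
-- ===== Notes on version B (the rewrite author's own statement) =====
-- stated objective: alternative
-- what changed: B replaces the stable descending comparison sort over scored sources with a counting-sort style pass (score buckets emitted high-to-low in input order) and replaces the five-branch scorer chain with a single table-driven loop over three tier rows.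
import Mathlib
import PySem

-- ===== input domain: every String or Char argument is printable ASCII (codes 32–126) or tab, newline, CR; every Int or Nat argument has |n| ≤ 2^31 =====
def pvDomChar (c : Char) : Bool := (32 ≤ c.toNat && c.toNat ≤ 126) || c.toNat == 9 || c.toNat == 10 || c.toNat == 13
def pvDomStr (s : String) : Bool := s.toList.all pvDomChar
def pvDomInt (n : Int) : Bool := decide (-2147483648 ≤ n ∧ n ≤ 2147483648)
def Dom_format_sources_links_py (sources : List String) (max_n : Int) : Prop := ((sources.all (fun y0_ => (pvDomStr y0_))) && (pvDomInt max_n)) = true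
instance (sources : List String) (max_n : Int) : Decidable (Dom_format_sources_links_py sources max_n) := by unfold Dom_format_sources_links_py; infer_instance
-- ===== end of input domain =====

-- B replaces the stable descending sort by score with score buckets emitted
-- high-to-low (a counting-sort pass) and a single table-driven scorer
-- (objective: alternative algorithm, same observable result).

-- ===== PORT A =====
-- the tier lists (shared string constants; Source B's table rows hold the same literals)
def pvTier1 : List String := [".gov.ng", "inec.gov.ng", "cbn.gov.ng", "nigeriaembassyusa.org",
  "statehouse.gov.ng", "ng.undp.org", "nigeria.gov.ng"]
def pvTier2 : List String := ["bbc.com", "bbc.co.uk", "reuters.com", "apnews.com", "aljazeera.com",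
  "theguardian.com", "cnn.com", "bloomberg.com", "nytimes.com"]
def pvTier3 : List String := ["channelstv.com", "premiumtimesng.com", "thecable.ng",
  "punchng.com", "vanguardngr.com", "thenationonlineng.net",
  "dailytrust.com", "saharareporters.com", "businessday.ng",
  "thisdaylive.com", "tribuneonlineng.com"]
def pvExts : List String := [".com", ".org", ".ng", ".net"]
def pvLowCred : List String := ["facebook.com", "twitter.com", "x.com", "instagram.com",
  "tiktok.com", "blog", "wordpress.com", "medium.com"]

-- _split_title_url (the same helper appears verbatim in Source A and Source B; both ports call it)
-- s.split(" - ", 1): under the guard '" - " in s' Python yields exactly two pieces,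
-- so reading pieces 0 and 1 of PySem.Str.splitMax? is exact.
def split_title_url (s : String) : String × String :=
  if PySem.Str.isIn " - " s then
    let parts := (PySem.Str.splitMax? s " - " 1).getD []
    (PySem.Str.strip (parts.getD 0 ""), PySem.Str.strip (parts.getD 1 ""))
  else
    (PySem.Str.strip "Source", PySem.Str.strip s)

def score_source_credibility (url : String) : Int :=
  let ul := PySem.Str.lower url
  if pvTier1.any (fun d => PySem.Str.isIn d ul) then 5
  else if pvTier2.any (fun d => PySem.Str.isIn d ul) then 4
  else if pvTier3.any (fun d => PySem.Str.isIn d ul) then 4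
  else if pvExts.any (fun d => PySem.Str.isIn d ul) then 3
  else if pvLowCred.any (fun d => PySem.Str.isIn d ul) then 2
  else 2

def format_sources_links_py (sources : List String) (max_n : Int) : String :=
  if sources = [] then ""
  else
    let scored := sources.foldl (fun acc s =>
      let tu := split_title_url s
      acc ++ [(score_source_credibility tu.2, s, tu.1, tu.2)]) []
    let sortedScored := PySem.List.sorted scored (fun x => x.1) true
    let items := (PySem.List.slice sortedScored none (some max_n)).foldl
      (fun acc x => acc ++ ["- " ++ x.2.2.1 ++ " — " ++ x.2.2.2]) ([] : List String)
    if items ≠ [] then "Sources:\n" ++ PySem.Str.join "\n" items else ""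

-- ===== PORT B =====
-- _TIER_TABLE (rows hold the same string literals as A's lists; row 4 is tiers 2 and 3 merged)
def pvTierTable : List (Int × List String) := [(5, pvTier1), (4, pvTier2 ++ pvTier3), (3, pvExts)]

-- the 'for score, needles in _TIER_TABLE' loop with its early return
def credLoop (u : String) : List (Int × List String) → Int
  | [] => 2
  | (score, needles) :: rest =>
    if needles.any (fun n => PySem.Str.isIn n u) then score else credLoop u rest

def cred_score (url : String) : Int := credLoop (PySem.Str.lower url) pvTierTable

def format_sources_links_py_alt (sources : List String) (max_n : Int) : String :=
  if sources = [] then ""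
  else
    let scored := sources.foldl (fun acc s =>
      let tu := split_title_url s
      acc ++ [(cred_score tu.2, tu.1, tu.2)]) []
    let ordered := ([5, 4, 3, 2, 1] : List Int).flatMap (fun want =>
      (scored.filter (fun x => x.1 == want)).map (fun x => (x.2.1, x.2.2)))
    let items := (PySem.List.slice ordered none (some max_n)).map
      (fun tu => "- " ++ tu.1 ++ " — " ++ tu.2)
    if items ≠ [] then "Sources:\n" ++ PySem.Str.join "\n" items else ""

-- ===== PRECONDITION & SPEC =====
def Spec_format_sources_links_py (sources : List String) (max_n : Int) (out : String) : Prop := out = format_sources_links_py_alt sources max_n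
instance (sources : List String) (max_n : Int) (out : String) : Decidable (Spec_format_sources_links_py sources max_n out) := by unfold Spec_format_sources_links_py; infer_instance

-- ===== CLAIM (what is proved, stated in full; the proofs are below) =====
def Claim_equal_format_sources_links_py : Prop := ∀ (sources : List String) (max_n : Int), Dom_format_sources_links_py sources max_n → Spec_format_sources_links_py sources max_n (format_sources_links_py sources max_n)

-- ===== LEMMAS AND PROOFS =====

-- the two scorers agree
theorem cred_score_eq (url : String) :
    cred_score url = score_source_credibility url := by
  unfold cred_score score_source_credibility pvTierTable
  simp only [credLoop, List.any_append]
  cases h1 : pvTier1.any (fun d => PySem.Str.isIn d (PySem.Str.lower url)) <;>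
    cases h2 : pvTier2.any (fun d => PySem.Str.isIn d (PySem.Str.lower url)) <;>
      cases h3 : pvTier3.any (fun d => PySem.Str.isIn d (PySem.Str.lower url)) <;>
        cases h4 : pvExts.any (fun d => PySem.Str.isIn d (PySem.Str.lower url)) <;>
          simp_all

-- the scorer only produces 5, 4, 3 or 2
theorem score_mem (url : String) :
    score_source_credibility url = 5 ∨ score_source_credibility url = 4 ∨
    score_source_credibility url = 3 ∨ score_source_credibility url = 2 := by
  cases h1 : pvTier1.any (fun d => PySem.Str.isIn d (PySem.Str.lower url)) <;>
    cases h2 : pvTier2.any (fun d => PySem.Str.isIn d (PySem.Str.lower url)) <;>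
      cases h3 : pvTier3.any (fun d => PySem.Str.isIn d (PySem.Str.lower url)) <;>
        cases h4 : pvExts.any (fun d => PySem.Str.isIn d (PySem.Str.lower url)) <;>
          cases h5 : pvLowCred.any (fun d => PySem.Str.isIn d (PySem.Str.lower url)) <;>
            (simp only [score_source_credibility, h1, h2, h3, h4, h5]; norm_num)

-- insertBy passes over a block it does not go before
theorem insertBy_append_of_not {α : Type} (before : α → α → Bool) (x : α) (l1 l2 : List α)
    (h : ∀ y ∈ l1, before x y = false) :
    PySem.List.insertBy before x (l1 ++ l2) = l1 ++ PySem.List.insertBy before x l2 := by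
  induction l1 with
  | nil => rfl
  | cons y ys ih =>
    have hy : before x y = false := h y (by simp)
    simp only [List.cons_append, PySem.List.insertBy, hy]
    simp only [Bool.false_eq_true, if_false]
    exact congrArg (y :: ·) (ih fun z hz => h z (by simp [hz]))

-- insertBy drops in front of a block it goes before everywhere
theorem insertBy_all_before {α : Type} (before : α → α → Bool) (x : α) (l : List α)
    (h : ∀ y ∈ l, before x y = true) :
    PySem.List.insertBy before x l = x :: l := by
  cases l with
  | nil => rfl
  | cons y ys => simp [PySem.List.insertBy, h y (by simp)]

-- the stable descending sort of a {5,4,3,2}-keyed list is its buckets, high key first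
-- the stable descending sort of a {5,4,3,2}-keyed list is its buckets, high key first
theorem sorted_buckets {α : Type} (key : α → Int) (xs : List α)
    (h : ∀ x ∈ xs, key x = 5 ∨ key x = 4 ∨ key x = 3 ∨ key x = 2) :
    PySem.List.sorted xs key true =
      xs.filter (fun x => key x == 5) ++ xs.filter (fun x => key x == 4) ++
      xs.filter (fun x => key x == 3) ++ xs.filter (fun x => key x == 2) := by
  rw [PySem.List.sorted_rev_eq_foldl_insertBy]
  induction xs using List.reverseRecOn with
  | nil => simp
  | append_singleton xs x ih =>
    rw [List.foldl_append, List.foldl_cons, List.foldl_nil,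
      ih (fun y hy => h y (by simp [hy])), List.append_assoc, List.append_assoc]
    have hfive : ∀ y ∈ xs.filter (fun x => key x == 5), key y = 5 :=
      fun y hy => by simpa using (List.mem_filter.mp hy).2
    have hfour : ∀ y ∈ xs.filter (fun x => key x == 4), key y = 4 :=
      fun y hy => by simpa using (List.mem_filter.mp hy).2
    have hthree : ∀ y ∈ xs.filter (fun x => key x == 3), key y = 3 :=
      fun y hy => by simpa using (List.mem_filter.mp hy).2
    have htwo : ∀ y ∈ xs.filter (fun x => key x == 2), key y = 2 :=
      fun y hy => by simpa using (List.mem_filter.mp hy).2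
    rcases h x (by simp) with hx | hx | hx | hx
    · -- key x = 5 : past bucket 5, before everything below
      rw [insertBy_append_of_not _ x _ _ (fun y hy => by simp [hfive y hy, hx]),
        insertBy_all_before _ x _ (fun y hy => by
          rcases List.mem_append.mp hy with hy | hy
          · simp [hfour y hy, hx]
          · rcases List.mem_append.mp hy with hy | hy
            · simp [hthree y hy, hx]
            · simp [htwo y hy, hx])]
      simp [List.filter_append, hx, List.append_assoc]
    · -- key x = 4
      rw [insertBy_append_of_not _ x _ _ (fun y hy => by simp [hfive y hy, hx]),
        insertBy_append_of_not _ x _ _ (fun y hy => by simp [hfour y hy, hx]),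
        insertBy_all_before _ x _ (fun y hy => by
          rcases List.mem_append.mp hy with hy | hy
          · simp [hthree y hy, hx]
          · simp [htwo y hy, hx])]
      simp [List.filter_append, hx, List.append_assoc]
    · -- key x = 3
      rw [insertBy_append_of_not _ x _ _ (fun y hy => by simp [hfive y hy, hx]),
        insertBy_append_of_not _ x _ _ (fun y hy => by simp [hfour y hy, hx]),
        insertBy_append_of_not _ x _ _ (fun y hy => by simp [hthree y hy, hx]),
        insertBy_all_before _ x _ (fun y hy => by simp [htwo y hy, hx])]
      simp [List.filter_append, hx, List.append_assoc]
    · -- key x = 2 : past every bucket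
      rw [insertBy_append_of_not _ x _ _ (fun y hy => by simp [hfive y hy, hx]),
        insertBy_append_of_not _ x _ _ (fun y hy => by simp [hfour y hy, hx]),
        insertBy_append_of_not _ x _ _ (fun y hy => by simp [hthree y hy, hx]),
        PySem.List.insertBy_of_forall_not_before _ x _ (fun y hy => by simp [htwo y hy, hx])]
      simp [List.filter_append, hx, List.append_assoc]

-- slice commutes with map
theorem slice_map {α β : Type} (f : α → β) (xs : List α) (b : Int) :
    PySem.List.slice (xs.map f) none (some b) = (PySem.List.slice xs none (some b)).map f := by
  simp [PySem.List.slice, PySem.List.clampIdx, List.map_take]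

theorem bridge {σ : Type} (f : σ → Int × String × String × String)
    (g : σ → Int × String × String)
    (hfg : ∀ s, g s = ((f s).1, (f s).2.2.1, (f s).2.2.2))
    (hmem : ∀ s, (f s).1 = 5 ∨ (f s).1 = 4 ∨ (f s).1 = 3 ∨ (f s).1 = 2)
    (sources : List σ) (max_n : Int) :
    (PySem.List.slice (PySem.List.sorted (sources.map f) (fun x => x.1) true)
        none (some max_n)).map (fun x => "- " ++ x.2.2.1 ++ " — " ++ x.2.2.2)
    = (PySem.List.slice (([5, 4, 3, 2, 1] : List Int).flatMap (fun want =>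
        ((sources.map g).filter (fun x => x.1 == want)).map (fun x => (x.2.1, x.2.2))))
        none (some max_n)).map (fun tu => "- " ++ tu.1 ++ " — " ++ tu.2) := by
  rw [sorted_buckets (fun x => x.1) (sources.map f)
    (fun x hx => by obtain ⟨s, -, rfl⟩ := List.mem_map.mp hx; exact hmem s)]
  simp only [List.flatMap_cons, List.flatMap_nil, List.append_nil]
  have hpred : ∀ c : Int, ((fun x : Int × String × String => x.1 == c) ∘ g)
      = ((fun x : Int × String × String × String => x.1 == c) ∘ f) := by
    intro c; funext s; simp [hfg s]
  simp only [List.filter_map, hpred]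
  have h1 : sources.filter ((fun x : Int × String × String × String => x.1 == 1) ∘ f) = [] := by
    rw [List.filter_eq_nil_iff]
    intro s _
    rcases hmem s with h | h | h | h <;> simp [Function.comp, h]
  rw [h1]
  simp only [List.map_nil, List.append_nil, ← List.map_append, slice_map, List.map_map]
  simp only [List.append_assoc]
  refine List.map_congr_left (fun s _ => ?_)
  simp [Function.comp, hfg s]
def fA (s : String) : Int × String × String × String :=
  (score_source_credibility (split_title_url s).2, s, (split_title_url s).1, (split_title_url s).2)
def gB (s : String) : Int × String × String :=
  (cred_score (split_title_url s).2, (split_title_url s).1, (split_title_url s).2)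

theorem hfg_lem (s : String) : gB s = ((fA s).1, (fA s).2.2.1, (fA s).2.2.2) := by
  simp only [fA, gB, cred_score_eq]

theorem hmem_lem (s : String) : (fA s).1 = 5 ∨ (fA s).1 = 4 ∨ (fA s).1 = 3 ∨ (fA s).1 = 2 := by
  simp only [fA]
  exact score_mem _

theorem main_eq (sources : List String) (max_n : Int) :
    format_sources_links_py sources max_n = format_sources_links_py_alt sources max_n := by
  unfold format_sources_links_py format_sources_links_py_alt
  by_cases hs : sources = []
  · simp [hs]
  · simp only [hs, if_false]
    simp only [PySem.List.foldl_append_singleton_eq_map, List.nil_append]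
    rw [show (fun s : String => (score_source_credibility (split_title_url s).2, s,
          (split_title_url s).1, (split_title_url s).2)) = fA from rfl,
        show (fun s : String => (cred_score (split_title_url s).2,
          (split_title_url s).1, (split_title_url s).2)) = gB from rfl,
        bridge fA gB hfg_lem hmem_lem sources max_n]

-- ===== VERDICT (by name: the statement is the Claim_ definition above) =====
theorem format_sources_links_py_spec : Claim_equal_format_sources_links_py := by
  intro sources max_n _
  unfold Spec_format_sources_links_py
  exact main_eq sources max_n
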